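-- pv_equiv track=rewrite | github.com/otaks/190 | app.py | getRenzoku
-- ===== SOURCE A (Python) =====
-- def getRenzoku(winlose):
--     ret = 0
--     t = winlose[::-1]
--     for i in range(len(t)):
--         if t[i] == "1":
--             ret = ret + 1
--         else:
--             break
--     return ret
-- ===== SOURCE B (Python) =====
-- def getRenzoku(winlose):
--     return len(winlose) - len(winlose.rstrip("1"))
-- ===== Notes on version B (the rewrite author's own statement) =====
-- stated objective: idiomatic
-- what changed: Replaces the reversal, index loop, accumulator and break with a single rstrip of the trailing ones and a length subtraction.
import Mathlib
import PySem

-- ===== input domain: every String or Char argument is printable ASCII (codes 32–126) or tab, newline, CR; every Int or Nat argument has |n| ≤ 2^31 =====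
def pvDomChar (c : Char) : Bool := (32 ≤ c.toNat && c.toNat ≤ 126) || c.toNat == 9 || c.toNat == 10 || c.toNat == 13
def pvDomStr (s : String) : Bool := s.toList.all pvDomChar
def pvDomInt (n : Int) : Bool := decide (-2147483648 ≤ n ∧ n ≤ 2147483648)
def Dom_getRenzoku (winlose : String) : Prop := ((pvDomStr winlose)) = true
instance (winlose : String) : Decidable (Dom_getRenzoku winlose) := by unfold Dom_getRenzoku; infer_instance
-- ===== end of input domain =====

-- B replaces A's reversal + index loop + break with rstrip('1') and a length subtraction (idiomatic).

-- ===== PORT A =====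
-- the for-loop over range(len(t)) with break: counts leading '1's of t, stops at first non-'1'
def getRenzokuLoop (t : List Char) (ret : Int) : Int :=
  match t with
  | [] => ret
  | c :: rest => if c = '1' then getRenzokuLoop rest (ret + 1) else ret

def getRenzoku (winlose : String) : Int :=
  getRenzokuLoop ((PySem.List.slice? winlose.toList none none (-1)).getD []) 0

-- ===== PORT B =====
-- rstrip("1") ported by hand: drop trailing '1' characters (exact for this single-char strip set)
def getRenzoku_alt (winlose : String) : Int :=
  let l := winlose.toList
  let stripped := (l.reverse.dropWhile (fun c => c == '1')).reverse
  (l.length : Int) - (stripped.length : Int)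

-- ===== PRECONDITION & SPEC =====
def Spec_getRenzoku (winlose : String) (out : Int) : Prop := out = getRenzoku_alt winlose
instance (winlose : String) (out : Int) : Decidable (Spec_getRenzoku winlose out) := by unfold Spec_getRenzoku; infer_instance

-- ===== CLAIM (what is proved, stated in full; the proofs are below) =====
def Claim_equal_getRenzoku : Prop := ∀ (winlose : String), Dom_getRenzoku winlose → Spec_getRenzoku winlose (getRenzoku winlose)

-- ===== LEMMAS AND PROOFS =====
theorem getRenzokuLoop_eq_takeWhile (t : List Char) (ret : Int) :
    getRenzokuLoop t ret = ret + ((t.takeWhile (fun c => c == '1')).length : Int) := by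
  induction t generalizing ret with
  | nil => simp [getRenzokuLoop]
  | cons c rest ih =>
    simp only [getRenzokuLoop, List.takeWhile]
    by_cases h : c = '1'
    · simp [h, ih]; ring
    · have hb : (c == '1') = false := by simp [h]
      rw [if_neg h]; simp [hb]

theorem getRenzoku_spec : Claim_equal_getRenzoku := by
  intro w _
  unfold Spec_getRenzoku getRenzoku getRenzoku_alt
  rw [PySem.List.slice?_none_none_neg_one, Option.getD_some, getRenzokuLoop_eq_takeWhile]
  have h : (w.toList.reverse.takeWhile (fun c => c == '1')).length +
      (w.toList.reverse.dropWhile (fun c => c == '1')).length = w.toList.reverse.length := by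
    rw [← List.length_append, List.takeWhile_append_dropWhile]
  simp only [List.length_reverse] at h ⊢
  omega
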